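-- pv_equiv track=rewrite | github.com/Barun-2005/manga-gen-ai-pipeline | image_gen/prompt_builder.py | _parse_scene_description
-- ===== SOURCE A (Python) =====
-- from typing import Dict, List, Any, Optional, Tuple
--
-- def _parse_scene_description(description: str) -> Tuple[str, str, str, List[str], str]:
--     """
--     Parse a scene description to extract key elements.
--
--     Args:
--         description: Scene description text
--
--     Returns:
--         Tuple of (location, time_of_day, mood, characters, action)
--     """
--     # Default values
--     location = "indoor setting"
--     time_of_day = "day"
--     mood = "neutral"
--     characters = ["character"]
--     action = "standing"
--
--     desc_lower = description.lower()
--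
--     # Extract location clues
--     if any(word in desc_lower for word in ["forest", "woods", "trees"]):
--         location = "forest"
--     elif any(word in desc_lower for word in ["city", "street", "building", "urban"]):
--         location = "city street"
--     elif any(word in desc_lower for word in ["school", "classroom", "desk"]):
--         location = "school"
--     elif any(word in desc_lower for word in ["home", "house", "room", "kitchen", "bedroom"]):
--         location = "indoor home"
--     elif any(word in desc_lower for word in ["mountain", "cliff", "peak"]):
--         location = "mountain"
--     elif any(word in desc_lower for word in ["beach", "ocean", "sea", "water"]):
--         location = "beach"
--
--     # Extract time clues
--     if any(word in desc_lower for word in ["night", "dark", "moon", "stars"]):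
--         time_of_day = "night"
--     elif any(word in desc_lower for word in ["sunset", "dusk", "evening"]):
--         time_of_day = "sunset"
--     elif any(word in desc_lower for word in ["sunrise", "dawn", "morning"]):
--         time_of_day = "morning"
--
--     # Extract mood clues
--     if any(word in desc_lower for word in ["angry", "rage", "furious", "mad"]):
--         mood = "angry"
--     elif any(word in desc_lower for word in ["sad", "crying", "tears", "sorrow"]):
--         mood = "sad"
--     elif any(word in desc_lower for word in ["happy", "joy", "smile", "laugh"]):
--         mood = "happy"
--     elif any(word in desc_lower for word in ["scared", "fear", "afraid", "terror"]):
--         mood = "fearful"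
--     elif any(word in desc_lower for word in ["serious", "determined", "focused"]):
--         mood = "serious"
--     elif any(word in desc_lower for word in ["surprised", "shock", "amazed"]):
--         mood = "surprised"
--
--     # Extract action clues
--     if any(word in desc_lower for word in ["running", "run", "sprint"]):
--         action = "running"
--     elif any(word in desc_lower for word in ["fighting", "fight", "battle", "attack"]):
--         action = "fighting"
--     elif any(word in desc_lower for word in ["walking", "walk", "moving"]):
--         action = "walking"
--     elif any(word in desc_lower for word in ["sitting", "sit", "seated"]):
--         action = "sitting"
--     elif any(word in desc_lower for word in ["talking", "speak", "conversation"]):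
--         action = "talking"
--     elif any(word in desc_lower for word in ["looking", "watching", "observing"]):
--         action = "looking"
--
--     return location, time_of_day, mood, characters, action
-- ===== SOURCE B (Python) =====
-- # Alternative algorithm: one flat (keyword, field, priority, value) table is
-- # scanned once for keyword hits; each field is then chosen by minimum priority
-- # among its hits (defaults when none), instead of four ordered if/elif chains.
--
-- _TABLE = [
--     ("forest", "location", 0, "forest"),
--     ("woods", "location", 0, "forest"),
--     ("trees", "location", 0, "forest"),
--     ("city", "location", 1, "city street"),
--     ("street", "location", 1, "city street"),
--     ("building", "location", 1, "city street"),
--     ("urban", "location", 1, "city street"),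
--     ("school", "location", 2, "school"),
--     ("classroom", "location", 2, "school"),
--     ("desk", "location", 2, "school"),
--     ("home", "location", 3, "indoor home"),
--     ("house", "location", 3, "indoor home"),
--     ("room", "location", 3, "indoor home"),
--     ("kitchen", "location", 3, "indoor home"),
--     ("bedroom", "location", 3, "indoor home"),
--     ("mountain", "location", 4, "mountain"),
--     ("cliff", "location", 4, "mountain"),
--     ("peak", "location", 4, "mountain"),
--     ("beach", "location", 5, "beach"),
--     ("ocean", "location", 5, "beach"),
--     ("sea", "location", 5, "beach"),
--     ("water", "location", 5, "beach"),
--     ("night", "time_of_day", 0, "night"),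
--     ("dark", "time_of_day", 0, "night"),
--     ("moon", "time_of_day", 0, "night"),
--     ("stars", "time_of_day", 0, "night"),
--     ("sunset", "time_of_day", 1, "sunset"),
--     ("dusk", "time_of_day", 1, "sunset"),
--     ("evening", "time_of_day", 1, "sunset"),
--     ("sunrise", "time_of_day", 2, "morning"),
--     ("dawn", "time_of_day", 2, "morning"),
--     ("morning", "time_of_day", 2, "morning"),
--     ("angry", "mood", 0, "angry"),
--     ("rage", "mood", 0, "angry"),
--     ("furious", "mood", 0, "angry"),
--     ("mad", "mood", 0, "angry"),
--     ("sad", "mood", 1, "sad"),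
--     ("crying", "mood", 1, "sad"),
--     ("tears", "mood", 1, "sad"),
--     ("sorrow", "mood", 1, "sad"),
--     ("happy", "mood", 2, "happy"),
--     ("joy", "mood", 2, "happy"),
--     ("smile", "mood", 2, "happy"),
--     ("laugh", "mood", 2, "happy"),
--     ("scared", "mood", 3, "fearful"),
--     ("fear", "mood", 3, "fearful"),
--     ("afraid", "mood", 3, "fearful"),
--     ("terror", "mood", 3, "fearful"),
--     ("serious", "mood", 4, "serious"),
--     ("determined", "mood", 4, "serious"),
--     ("focused", "mood", 4, "serious"),
--     ("surprised", "mood", 5, "surprised"),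
--     ("shock", "mood", 5, "surprised"),
--     ("amazed", "mood", 5, "surprised"),
--     ("running", "action", 0, "running"),
--     ("run", "action", 0, "running"),
--     ("sprint", "action", 0, "running"),
--     ("fighting", "action", 1, "fighting"),
--     ("fight", "action", 1, "fighting"),
--     ("battle", "action", 1, "fighting"),
--     ("attack", "action", 1, "fighting"),
--     ("walking", "action", 2, "walking"),
--     ("walk", "action", 2, "walking"),
--     ("moving", "action", 2, "walking"),
--     ("sitting", "action", 3, "sitting"),
--     ("sit", "action", 3, "sitting"),
--     ("seated", "action", 3, "sitting"),
--     ("talking", "action", 4, "talking"),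
--     ("speak", "action", 4, "talking"),
--     ("conversation", "action", 4, "talking"),
--     ("looking", "action", 5, "looking"),
--     ("watching", "action", 5, "looking"),
--     ("observing", "action", 5, "looking"),]
--
--
-- def _pick(hits, field, default):
--     ranked = [(p, v) for (_, f, p, v) in hits if f == field]
--     return min(ranked)[1] if ranked else default
--
--
-- def _parse_scene_description(description):
--     d = description.lower()
--     hits = [row for row in _TABLE if row[0] in d]
--     return (_pick(hits, "location", "indoor setting"),
--             _pick(hits, "time_of_day", "day"),
--             _pick(hits, "mood", "neutral"),
--             ["character"],
--             _pick(hits, "action", "standing"))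
-- ===== Notes on version B (the rewrite author's own statement) =====
-- stated objective: alternative
-- what changed: B replaces A's four ordered if/elif chains by a single flat (keyword, field, priority, value) table scanned once for hits, after which each field is selected as the minimum-priority hit (default when none) rather than by first-match control flow.
import Mathlib
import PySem

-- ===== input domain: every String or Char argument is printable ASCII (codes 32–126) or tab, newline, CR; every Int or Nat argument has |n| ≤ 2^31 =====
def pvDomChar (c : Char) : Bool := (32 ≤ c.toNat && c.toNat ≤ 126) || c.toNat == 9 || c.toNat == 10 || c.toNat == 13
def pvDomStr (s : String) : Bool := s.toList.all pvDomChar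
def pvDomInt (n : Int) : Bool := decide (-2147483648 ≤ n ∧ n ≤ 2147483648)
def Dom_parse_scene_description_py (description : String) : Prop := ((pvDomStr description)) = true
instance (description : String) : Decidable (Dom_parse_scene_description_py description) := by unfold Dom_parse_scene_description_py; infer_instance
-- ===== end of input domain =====

-- B scans one flat (keyword, field, priority, value) table for hits and picks each
-- field by minimum priority, instead of A's four ordered if/elif chains (alternative).

-- ===== PORT A =====
-- literal transliteration of A's if/elif chains
def parse_scene_description_py (description : String) : String × String × String × List String × String :=
  let location := "indoor setting"
  let time_of_day := "day"
  let mood := "neutral"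
  let characters := ["character"]
  let action := "standing"
  let d := PySem.Str.lower description
  let location :=
    if ["forest", "woods", "trees"].any (fun w => PySem.Str.isIn w d) then "forest"
    else if ["city", "street", "building", "urban"].any (fun w => PySem.Str.isIn w d) then "city street"
    else if ["school", "classroom", "desk"].any (fun w => PySem.Str.isIn w d) then "school"
    else if ["home", "house", "room", "kitchen", "bedroom"].any (fun w => PySem.Str.isIn w d) then "indoor home"
    else if ["mountain", "cliff", "peak"].any (fun w => PySem.Str.isIn w d) then "mountain"
    else if ["beach", "ocean", "sea", "water"].any (fun w => PySem.Str.isIn w d) then "beach"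
    else location
  let time_of_day :=
    if ["night", "dark", "moon", "stars"].any (fun w => PySem.Str.isIn w d) then "night"
    else if ["sunset", "dusk", "evening"].any (fun w => PySem.Str.isIn w d) then "sunset"
    else if ["sunrise", "dawn", "morning"].any (fun w => PySem.Str.isIn w d) then "morning"
    else time_of_day
  let mood :=
    if ["angry", "rage", "furious", "mad"].any (fun w => PySem.Str.isIn w d) then "angry"
    else if ["sad", "crying", "tears", "sorrow"].any (fun w => PySem.Str.isIn w d) then "sad"
    else if ["happy", "joy", "smile", "laugh"].any (fun w => PySem.Str.isIn w d) then "happy"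
    else if ["scared", "fear", "afraid", "terror"].any (fun w => PySem.Str.isIn w d) then "fearful"
    else if ["serious", "determined", "focused"].any (fun w => PySem.Str.isIn w d) then "serious"
    else if ["surprised", "shock", "amazed"].any (fun w => PySem.Str.isIn w d) then "surprised"
    else mood
  let action :=
    if ["running", "run", "sprint"].any (fun w => PySem.Str.isIn w d) then "running"
    else if ["fighting", "fight", "battle", "attack"].any (fun w => PySem.Str.isIn w d) then "fighting"
    else if ["walking", "walk", "moving"].any (fun w => PySem.Str.isIn w d) then "walking"
    else if ["sitting", "sit", "seated"].any (fun w => PySem.Str.isIn w d) then "sitting"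
    else if ["talking", "speak", "conversation"].any (fun w => PySem.Str.isIn w d) then "talking"
    else if ["looking", "watching", "observing"].any (fun w => PySem.Str.isIn w d) then "looking"
    else action
  (location, time_of_day, mood, characters, action)

-- ===== PORT B =====
-- the flat table of Source B: (keyword, field, priority, value)
def pvTable : List (String × String × Nat × String) :=
  [   ("forest", "location", 0, "forest"),
   ("woods", "location", 0, "forest"),
   ("trees", "location", 0, "forest"),
   ("city", "location", 1, "city street"),
   ("street", "location", 1, "city street"),
   ("building", "location", 1, "city street"),
   ("urban", "location", 1, "city street"),
   ("school", "location", 2, "school"),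
   ("classroom", "location", 2, "school"),
   ("desk", "location", 2, "school"),
   ("home", "location", 3, "indoor home"),
   ("house", "location", 3, "indoor home"),
   ("room", "location", 3, "indoor home"),
   ("kitchen", "location", 3, "indoor home"),
   ("bedroom", "location", 3, "indoor home"),
   ("mountain", "location", 4, "mountain"),
   ("cliff", "location", 4, "mountain"),
   ("peak", "location", 4, "mountain"),
   ("beach", "location", 5, "beach"),
   ("ocean", "location", 5, "beach"),
   ("sea", "location", 5, "beach"),
   ("water", "location", 5, "beach"),
   ("night", "time_of_day", 0, "night"),
   ("dark", "time_of_day", 0, "night"),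
   ("moon", "time_of_day", 0, "night"),
   ("stars", "time_of_day", 0, "night"),
   ("sunset", "time_of_day", 1, "sunset"),
   ("dusk", "time_of_day", 1, "sunset"),
   ("evening", "time_of_day", 1, "sunset"),
   ("sunrise", "time_of_day", 2, "morning"),
   ("dawn", "time_of_day", 2, "morning"),
   ("morning", "time_of_day", 2, "morning"),
   ("angry", "mood", 0, "angry"),
   ("rage", "mood", 0, "angry"),
   ("furious", "mood", 0, "angry"),
   ("mad", "mood", 0, "angry"),
   ("sad", "mood", 1, "sad"),
   ("crying", "mood", 1, "sad"),
   ("tears", "mood", 1, "sad"),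
   ("sorrow", "mood", 1, "sad"),
   ("happy", "mood", 2, "happy"),
   ("joy", "mood", 2, "happy"),
   ("smile", "mood", 2, "happy"),
   ("laugh", "mood", 2, "happy"),
   ("scared", "mood", 3, "fearful"),
   ("fear", "mood", 3, "fearful"),
   ("afraid", "mood", 3, "fearful"),
   ("terror", "mood", 3, "fearful"),
   ("serious", "mood", 4, "serious"),
   ("determined", "mood", 4, "serious"),
   ("focused", "mood", 4, "serious"),
   ("surprised", "mood", 5, "surprised"),
   ("shock", "mood", 5, "surprised"),
   ("amazed", "mood", 5, "surprised"),
   ("running", "action", 0, "running"),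
   ("run", "action", 0, "running"),
   ("sprint", "action", 0, "running"),
   ("fighting", "action", 1, "fighting"),
   ("fight", "action", 1, "fighting"),
   ("battle", "action", 1, "fighting"),
   ("attack", "action", 1, "fighting"),
   ("walking", "action", 2, "walking"),
   ("walk", "action", 2, "walking"),
   ("moving", "action", 2, "walking"),
   ("sitting", "action", 3, "sitting"),
   ("sit", "action", 3, "sitting"),
   ("seated", "action", 3, "sitting"),
   ("talking", "action", 4, "talking"),
   ("speak", "action", 4, "talking"),
   ("conversation", "action", 4, "talking"),
   ("looking", "action", 5, "looking"),
   ("watching", "action", 5, "looking"),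
   ("observing", "action", 5, "looking")]

-- Python's min over the ranked (priority, value) pairs; priority ties in the table
-- always carry equal values, so comparing priorities alone is exact here
def pvMinLex (l : List (Nat × String)) : Option (Nat × String) :=
  l.foldl (fun acc x =>
    match acc with
    | none => some x
    | some a => if x.1 < a.1 then some x else some a) none

-- _pick(hits, field, default) of Source B
def pvPick (hits : List (String × String × Nat × String)) (field dflt : String) : String :=
  let ranked := (hits.filter (fun r => r.2.1 == field)).map (fun r => r.2.2)
  match pvMinLex ranked with
  | none => dflt
  | some a => a.2

def parse_scene_description_py_alt (description : String) : String × String × String × List String × String :=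
  let d := PySem.Str.lower description
  let hits := pvTable.filter (fun r => PySem.Str.isIn r.1 d)
  (pvPick hits "location" "indoor setting",
   pvPick hits "time_of_day" "day",
   pvPick hits "mood" "neutral",
   ["character"],
   pvPick hits "action" "standing")

-- ===== PRECONDITION & SPEC =====
def Spec_parse_scene_description_py (description : String) (out : String × String × String × List String × String) : Prop := out = parse_scene_description_py_alt description
instance (description : String) (out : String × String × String × List String × String) : Decidable (Spec_parse_scene_description_py description out) := by unfold Spec_parse_scene_description_py; infer_instance

-- ===== CLAIM (what is proved, stated in full; the proofs are below) =====
def Claim_equal_parse_scene_description_py : Prop := ∀ (description : String), Dom_parse_scene_description_py description → Spec_parse_scene_description_py description (parse_scene_description_py description)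

-- ===== LEMMAS AND PROOFS =====

-- A's if/elif chain over a rule list, abstracted over the membership test m
def pvChain (m : String → Bool) : List (List String × String) → String → String
  | [], dflt => dflt
  | (ws, v) :: rest, dflt => if ws.any m then v else pvChain m rest dflt

-- the rows a rule list contributes to the flat table for field f, priorities from n
def pvTableRows (f : String) : Nat → List (List String × String) → List (String × String × Nat × String)
  | _, [] => []
  | n, (ws, v) :: rest => ws.map (fun kw => (kw, f, n, v)) ++ pvTableRows f (n + 1) rest

-- the matched (priority, value) pairs of a rule list under membership test m
def pvRows (m : String → Bool) : Nat → List (List String × String) → List (Nat × String)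
  | _, [] => []
  | n, (ws, v) :: rest => (ws.filter m).map (fun _ => (n, v)) ++ pvRows m (n + 1) rest

def pvRulesLoc : List (List String × String) :=
  [(["forest", "woods", "trees"], "forest"),
   (["city", "street", "building", "urban"], "city street"),
   (["school", "classroom", "desk"], "school"),
   (["home", "house", "room", "kitchen", "bedroom"], "indoor home"),
   (["mountain", "cliff", "peak"], "mountain"),
   (["beach", "ocean", "sea", "water"], "beach")]

def pvRulesTime : List (List String × String) :=
  [(["night", "dark", "moon", "stars"], "night"),
   (["sunset", "dusk", "evening"], "sunset"),
   (["sunrise", "dawn", "morning"], "morning")]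

def pvRulesMood : List (List String × String) :=
  [(["angry", "rage", "furious", "mad"], "angry"),
   (["sad", "crying", "tears", "sorrow"], "sad"),
   (["happy", "joy", "smile", "laugh"], "happy"),
   (["scared", "fear", "afraid", "terror"], "fearful"),
   (["serious", "determined", "focused"], "serious"),
   (["surprised", "shock", "amazed"], "surprised")]

def pvRulesAct : List (List String × String) :=
  [(["running", "run", "sprint"], "running"),
   (["fighting", "fight", "battle", "attack"], "fighting"),
   (["walking", "walk", "moving"], "walking"),
   (["sitting", "sit", "seated"], "sitting"),
   (["talking", "speak", "conversation"], "talking"),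
   (["looking", "watching", "observing"], "looking")]

theorem pvTable_field_loc : pvTable.filter (fun r => r.2.1 == "location") = pvTableRows "location" 0 pvRulesLoc := by decide
theorem pvTable_field_time : pvTable.filter (fun r => r.2.1 == "time_of_day") = pvTableRows "time_of_day" 0 pvRulesTime := by decide
theorem pvTable_field_mood : pvTable.filter (fun r => r.2.1 == "mood") = pvTableRows "mood" 0 pvRulesMood := by decide
theorem pvTable_field_act : pvTable.filter (fun r => r.2.1 == "action") = pvTableRows "action" 0 pvRulesAct := by decide

theorem pvRows_prio_ge (m : String → Bool) (rs : List (List String × String)) :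
    ∀ (n : Nat), ∀ p ∈ pvRows m n rs, n ≤ p.1 := by
  induction rs with
  | nil => intro n p hp; simp [pvRows] at hp
  | cons r rest ih =>
    intro n p hp
    obtain ⟨ws, v⟩ := r
    simp only [pvRows, List.mem_append, List.mem_map] at hp
    rcases hp with ⟨_, _, rfl⟩ | hp
    · exact le_refl n
    · exact Nat.le_of_succ_le (ih (n + 1) p hp)

theorem pvMinLex_keep (n : Nat) (v : String) (l : List (Nat × String))
    (h : ∀ p ∈ l, ¬ p.1 < n) :
    l.foldl (fun acc x =>
      match acc with
      | none => some x
      | some a => if x.1 < a.1 then some x else some a) (some (n, v)) = some (n, v) := by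
  induction l with
  | nil => rfl
  | cons x xs ih =>
    have hx : ¬ x.1 < n := h x (by simp)
    simp only [List.foldl_cons]
    rw [if_neg hx]
    exact ih (fun p hp => h p (by simp [hp]))

theorem pvMinLex_block (n : Nat) (v : String) (ws : List String) (rest : List (Nat × String))
    (hws : ws ≠ []) (hrest : ∀ p ∈ rest, n < p.1) :
    pvMinLex ((ws.map (fun _ => (n, v))) ++ rest) = some (n, v) := by
  obtain ⟨w, ws', rfl⟩ := List.exists_cons_of_ne_nil hws
  unfold pvMinLex
  simp only [List.map_cons, List.cons_append, List.foldl_cons]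
  exact pvMinLex_keep n v _ (by
    intro p hp
    rcases List.mem_append.mp hp with hp | hp
    · obtain ⟨_, _, rfl⟩ := List.mem_map.mp hp
      omega
    · exact Nat.lt_asymm (hrest p hp))

theorem pvMinLex_rows_eq_chain (m : String → Bool) (rs : List (List String × String)) :
    ∀ (n : Nat) (dflt : String),
      (match pvMinLex (pvRows m n rs) with
       | none => dflt
       | some a => a.2) = pvChain m rs dflt := by
  induction rs with
  | nil => intro n dflt; rfl
  | cons r rest ih =>
    intro n dflt
    obtain ⟨ws, v⟩ := r
    by_cases h : ws.any m
    · have hne : ws.filter m ≠ [] := by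
        obtain ⟨w, hw, hm⟩ := List.any_eq_true.mp h
        exact List.ne_nil_of_mem (List.mem_filter.mpr ⟨hw, hm⟩)
      have hblock := pvMinLex_block n v (ws.filter m) (pvRows m (n + 1) rest) hne
        (fun p hp => Nat.lt_of_succ_le (pvRows_prio_ge m rest (n + 1) p hp))
      simp only [pvRows, pvChain, if_pos h, hblock]
    · have hnil : ws.filter m = [] := by
        simp only [List.filter_eq_nil_iff]
        intro w hw
        exact fun hm => h (List.any_eq_true.mpr ⟨w, hw, hm⟩)
      simp only [pvRows, pvChain, if_neg h, hnil, List.map_nil, List.nil_append]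
      exact ih (n + 1) dflt

theorem pvRows_of_tableRows (m : String → Bool) (f : String) (rs : List (List String × String)) :
    ∀ (n : Nat),
      ((pvTableRows f n rs).filter (fun r => m r.1)).map (fun r => r.2.2) = pvRows m n rs := by
  induction rs with
  | nil => intro n; rfl
  | cons r rest ih =>
    intro n
    obtain ⟨ws, v⟩ := r
    simp only [pvTableRows, pvRows, List.filter_append, List.map_append, List.filter_map,
      List.map_map, ih (n + 1)]
    simp [Function.comp_def]

-- _pick over the hits equals A's chain for that field
theorem pvPick_eq_chain (d : String) (f dflt : String) (rules : List (List String × String))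
    (hf : pvTable.filter (fun r => r.2.1 == f) = pvTableRows f 0 rules) :
    pvPick (pvTable.filter (fun r => PySem.Str.isIn r.1 d)) f dflt
      = pvChain (fun w => PySem.Str.isIn w d) rules dflt := by
  unfold pvPick
  have hcomm : (pvTable.filter (fun r => PySem.Str.isIn r.1 d)).filter (fun r => r.2.1 == f)
      = (pvTable.filter (fun r => r.2.1 == f)).filter (fun r => PySem.Str.isIn r.1 d) := by
    simp only [List.filter_filter]
    exact List.filter_congr (fun r _ => Bool.and_comm _ _)
  rw [hcomm, hf, pvRows_of_tableRows (fun w => PySem.Str.isIn w d) f rules 0]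
  exact pvMinLex_rows_eq_chain _ rules 0 dflt

-- ===== VERDICT (by name: the statement is the Claim_ definition above) =====
theorem parse_scene_description_py_spec : Claim_equal_parse_scene_description_py := by
  intro description _
  unfold Spec_parse_scene_description_py parse_scene_description_py parse_scene_description_py_alt
  simp only [pvPick_eq_chain _ "location" _ pvRulesLoc pvTable_field_loc,
      pvPick_eq_chain _ "time_of_day" _ pvRulesTime pvTable_field_time,
      pvPick_eq_chain _ "mood" _ pvRulesMood pvTable_field_mood,
      pvPick_eq_chain _ "action" _ pvRulesAct pvTable_field_act]
  rfl
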